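-- pv_equiv track=rewrite | github.com/keshaws/CUNY_MSDS | Python/question_4.py | arr_balance_point
-- ===== SOURCE A (Python) =====
-- def arr_balance_point(arr):
--     # Forming prefix sum array from 0
--     if len(arr)>2:
--         # Finding the length of array
--         n = len(arr)
--         prefixSum = [0] * n
--         prefixSum[0] = arr[0]
--         for i in range(1, n):
--             prefixSum[i] = prefixSum[i - 1] + arr[i]
--
--             # Forming suffix sum array from n-1
--         suffixSum = [0] * n
--         suffixSum[n - 1] = arr[n - 1]
--         for i in range(n - 2, -1, -1):
--             suffixSum[i] = suffixSum[i + 1] + arr[i]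
--
--         # Find the point where prefix and suffix sums are same.
--         for i in range(1, n - 1, 1):
--             if prefixSum[i] == suffixSum[i]:
--                 return True
--
--         return False
--     else:
--         return False
-- ===== SOURCE B (Python) =====
-- def arr_balance_point(arr):
--     # Single pass with two scalars: a running prefix sum and the precomputed
--     # total, instead of building prefix/suffix arrays.
--     if len(arr) <= 2:
--         return False
--     total = sum(arr)
--     run = arr[0]
--     for x in arr[1:-1]:
--         run += x
--         if 2 * run - x == total:
--             return True
--     return False
-- ===== Notes on version B (the rewrite author's own statement) =====
-- stated objective: simpler
-- what changed: Replaced A's two auxiliary prefix/suffix arrays and three loops by a single forward pass keeping two scalars (a running prefix sum and the precomputed total), testing 2*run - x == total.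
import Mathlib
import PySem

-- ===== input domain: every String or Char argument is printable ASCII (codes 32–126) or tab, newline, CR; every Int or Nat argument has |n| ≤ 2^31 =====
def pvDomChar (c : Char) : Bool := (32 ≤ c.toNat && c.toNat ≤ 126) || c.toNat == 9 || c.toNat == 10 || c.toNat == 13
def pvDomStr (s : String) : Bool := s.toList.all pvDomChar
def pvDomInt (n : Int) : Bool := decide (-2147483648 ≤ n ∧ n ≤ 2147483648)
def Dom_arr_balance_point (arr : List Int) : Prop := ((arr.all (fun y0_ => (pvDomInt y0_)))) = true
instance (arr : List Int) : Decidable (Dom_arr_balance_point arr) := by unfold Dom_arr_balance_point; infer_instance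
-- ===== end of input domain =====

-- B replaces A's two auxiliary prefix/suffix arrays by a single forward pass
-- keeping two scalars (running prefix sum and the precomputed total): simpler.

-- ===== PORT A =====
-- prefixSum loop: prefixSum[i] = prefixSum[i-1] + arr[i], carried left to right
def pvPrefixA : Int → List Int → List Int
  | _, [] => []
  | prev, x :: xs => (prev + x) :: pvPrefixA (prev + x) xs

-- suffixSum loop: suffixSum[i] = suffixSum[i+1] + arr[i], carried right to left
def pvSuffixA : List Int → List Int
  | [] => []
  | x :: xs =>
    match pvSuffixA xs with
    | [] => [x]
    | s :: rest => (s + x) :: s :: rest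

def arr_balance_point (arr : List Int) : Bool :=
  if 2 < arr.length then
    let n : Nat := arr.length
    let prefixSum := pvPrefixA 0 arr
    let suffixSum := pvSuffixA arr
    -- for i in range(1, n-1): if prefixSum[i] == suffixSum[i]: return True
    (PySem.List.pyRange 1 ((n : Int) - 1) 1).any (fun i =>
      PySem.List.pyGetD prefixSum i 0 == PySem.List.pyGetD suffixSum i 0)
  else
    false

-- ===== PORT B =====
-- for x in arr[1:-1]: run += x; if 2*run - x == total: return True
def pvLoopB (total : Int) : Int → List Int → Bool
  | _, [] => false
  | run, x :: xs =>
    let r := run + x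
    if 2 * r - x == total then true else pvLoopB total r xs

def arr_balance_point_alt (arr : List Int) : Bool :=
  if arr.length ≤ 2 then false
  else
    let total := arr.sum
    pvLoopB total (arr.headD 0) (PySem.List.slice arr (some 1) (some (-1)))

-- ===== PRECONDITION & SPEC =====
def Spec_arr_balance_point (arr : List Int) (out : Bool) : Prop := out = arr_balance_point_alt arr
instance (arr : List Int) (out : Bool) : Decidable (Spec_arr_balance_point arr out) := by unfold Spec_arr_balance_point; infer_instance

-- ===== CLAIM (what is proved, stated in full; the proofs are below) =====
def Claim_equal_arr_balance_point : Prop := ∀ (arr : List Int), Dom_arr_balance_point arr → Spec_arr_balance_point arr (arr_balance_point arr)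

-- ===== LEMMAS AND PROOFS =====

theorem pvPrefixA_length (p : Int) (l : List Int) : (pvPrefixA p l).length = l.length := by
  induction l generalizing p with
  | nil => rfl
  | cons x xs ih => simp [pvPrefixA, ih]

theorem pvPrefixA_get (p : Int) (l : List Int) (i : Nat) (hi : i < l.length) :
    (pvPrefixA p l)[i]'(by rw [pvPrefixA_length]; exact hi) = p + (l.take (i + 1)).sum := by
  induction l generalizing p i with
  | nil => simp at hi
  | cons x xs ih =>
    cases i with
    | zero => simp [pvPrefixA]
    | succ j =>
      simp only [pvPrefixA, List.getElem_cons_succ, List.take_succ_cons, List.sum_cons]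
      rw [ih (p + x) j (by simpa using hi)]
      ring

def sfxSpec (l : List Int) : List Int := (List.range l.length).map (fun i => (l.drop i).sum)

theorem pvSuffixA_eq (l : List Int) : pvSuffixA l = sfxSpec l := by
  induction l with
  | nil => rfl
  | cons x xs ih =>
    cases xs with
    | nil => simp [pvSuffixA, sfxSpec]
    | cons y ys =>
      have hx : pvSuffixA (y :: ys) = (y + ys.sum) :: ((List.range ys.length).map (fun i => ((y :: ys).drop (i+1)).sum)) := by
        rw [ih]
        simp [sfxSpec, List.range_succ_eq_map, List.map_map, Function.comp_def]
      show (match pvSuffixA (y :: ys) with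
            | [] => [x]
            | s :: rest => (s + x) :: s :: rest) = sfxSpec (x :: y :: ys)
      rw [hx]
      simp [sfxSpec, List.range_succ_eq_map, List.map_map, Function.comp_def]
      ring_nf

theorem pvLoopB_iff (total r : Int) (l : List Int) :
    pvLoopB total r l = true ↔
      ∃ j : Nat, ∃ hj : j < l.length, 2 * (r + (l.take (j + 1)).sum) - l[j] = total := by
  induction l generalizing r with
  | nil => simp [pvLoopB]
  | cons x xs ih =>
    simp only [pvLoopB]
    by_cases h : 2 * (r + x) - x = total
    · simp only [h]
      constructor
      · intro _
        exact ⟨0, by simp, by simpa using h⟩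
      · intro _; simp
    · have hne : (2 * (r + x) - x == total) = false := by
        simp [h]
      simp only [hne, Bool.false_eq_true, if_false]
      rw [ih (r + x)]
      constructor
      · rintro ⟨j, hj, hv⟩
        refine ⟨j + 1, by simpa using Nat.succ_lt_succ hj, ?_⟩
        simp only [List.take_succ_cons, List.sum_cons, List.getElem_cons_succ]
        rw [← hv]; ring_nf
      · rintro ⟨j, hj, hv⟩
        cases j with
        | zero => exfalso; apply h; simpa using hv
        | succ k =>
          refine ⟨k, by simpa using hj, ?_⟩
          simp only [List.take_succ_cons, List.sum_cons, List.getElem_cons_succ] at hv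
          rw [← hv]; ring_nf

theorem slice_one_neg_one (xs : List Int) :
    PySem.List.slice xs (some 1) (some (-1)) = xs.tail.dropLast := by
  cases xs with
  | nil => rfl
  | cons x t =>
    simp [PySem.List.slice, PySem.List.clampIdx, List.dropLast_eq_take]
    split_ifs with h
    · omega
    · omega

theorem bool_eq_of_iff {a b : Bool} (h : a = true ↔ b = true) : a = b := by
  cases a <;> cases b <;> simp_all

-- common characterisation: "index k is a balance point"
def pvBal (arr : List Int) (k : Nat) : Prop :=
  1 ≤ k ∧ k + 1 < arr.length ∧ 2 * (arr.take (k + 1)).sum - arr.getD k 0 = arr.sum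

theorem balance_A (arr : List Int) :
    ((PySem.List.pyRange 1 ((arr.length : Int) - 1) 1).any (fun i =>
      PySem.List.pyGetD (pvPrefixA 0 arr) i 0 == PySem.List.pyGetD (pvSuffixA arr) i 0) = true)
    ↔ ∃ k : Nat, pvBal arr k := by
  rw [List.any_eq_true]
  have hcond : ∀ k : Nat, 1 ≤ k → k + 1 < arr.length →
      ((PySem.List.pyGetD (pvPrefixA 0 arr) (k : Int) 0 == PySem.List.pyGetD (pvSuffixA arr) (k : Int) 0) = true
        ↔ 2 * (arr.take (k + 1)).sum - arr.getD k 0 = arr.sum) := by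
    intro k hk1 hkn
    have hklt : k < arr.length := by omega
    have hplen : k < (pvPrefixA 0 arr).length := by rw [pvPrefixA_length]; exact hklt
    have hslen : k < (pvSuffixA arr).length := by
      rw [pvSuffixA_eq]; simpa [sfxSpec] using hklt
    rw [PySem.List.pyGetD_natCast, PySem.List.pyGetD_natCast,
        List.getD_eq_getElem _ _ hplen, List.getD_eq_getElem _ _ hslen,
        List.getD_eq_getElem _ _ hklt]
    rw [pvPrefixA_get 0 arr k hklt]
    have hss : (pvSuffixA arr)[k]'hslen = (arr.drop k).sum := by
      simp [pvSuffixA_eq, sfxSpec]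
    rw [hss, beq_iff_eq]
    have hsplit := List.sum_take_add_sum_drop arr k
    have hsucc := List.sum_take_succ arr k hklt
    constructor
    · intro h; linarith
    · intro h; linarith
  constructor
  · rintro ⟨i, hmem, hp⟩
    rw [PySem.List.mem_pyRange_one] at hmem
    obtain ⟨h1, h2⟩ := hmem
    have hik : i = ((i.toNat : Nat) : Int) := by omega
    have hk1 : 1 ≤ i.toNat := by omega
    have hkn : i.toNat + 1 < arr.length := by omega
    rw [hik] at hp
    exact ⟨i.toNat, hk1, hkn, (hcond i.toNat hk1 hkn).mp hp⟩
  · rintro ⟨k, hk1, hkn, hv⟩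
    refine ⟨(k : Int), ?_, (hcond k hk1 hkn).mpr hv⟩
    rw [PySem.List.mem_pyRange_one]
    omega

theorem balance_B (arr : List Int) (h3 : 2 < arr.length) :
    (pvLoopB arr.sum (arr.headD 0) (PySem.List.slice arr (some 1) (some (-1))) = true)
    ↔ ∃ k : Nat, pvBal arr k := by
  obtain ⟨x, t, rfl⟩ : ∃ x t, arr = x :: t := by
    cases arr with
    | nil => simp at h3
    | cons x t => exact ⟨x, t, rfl⟩
  rw [slice_one_neg_one, pvLoopB_iff]
  have hmidlen : ((x :: t).tail.dropLast).length = t.length - 1 := by simp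
  constructor
  · rintro ⟨j, hj, hv⟩
    rw [hmidlen] at hj
    refine ⟨j + 1, by omega, by simp; omega, ?_⟩
    have htake : ((x :: t).tail.dropLast).take (j + 1) = t.take (j + 1) := by
      simp only [List.tail_cons, List.dropLast_eq_take, List.take_take]
      congr 1
      omega
    have hget : ((x :: t).tail.dropLast)[j]'(by rw [hmidlen]; omega) = t[j]'(by omega) := by
      simp only [List.tail_cons]
      exact List.getElem_dropLast _
    rw [htake, hget] at hv
    have hgd : (x :: t).getD (j + 1) 0 = t[j]'(by omega) := by
      rw [List.getD_cons_succ, List.getD_eq_getElem _ _ (by omega : j < t.length)]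
    rw [hgd]
    simp only [List.take_succ_cons, List.sum_cons]
    simp only [List.headD_cons, List.sum_cons] at hv
    linarith
  · rintro ⟨k, hk1, hkn, hv⟩
    simp only [List.length_cons] at hkn
    obtain ⟨j, rfl⟩ : ∃ j, k = j + 1 := ⟨k - 1, by omega⟩
    refine ⟨j, by rw [hmidlen]; omega, ?_⟩
    have htake : ((x :: t).tail.dropLast).take (j + 1) = t.take (j + 1) := by
      simp only [List.tail_cons, List.dropLast_eq_take, List.take_take]
      congr 1
      omega
    have hget : ((x :: t).tail.dropLast)[j]'(by rw [hmidlen]; omega) = t[j]'(by omega) := by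
      simp only [List.tail_cons]
      exact List.getElem_dropLast _
    rw [htake, hget]
    simp only [List.take_succ_cons, List.sum_cons] at hv
    have hgd' : (x :: t).getD (j + 1) 0 = t[j]'(by omega) := by
      rw [List.getD_cons_succ, List.getD_eq_getElem _ _ (by omega : j < t.length)]
    rw [hgd'] at hv
    simp only [List.headD_cons, List.sum_cons]
    linarith

-- ===== VERDICT (by name: the statement is the Claim_ definition above) =====
theorem arr_balance_point_spec : Claim_equal_arr_balance_point := by
  intro arr _
  unfold Spec_arr_balance_point arr_balance_point arr_balance_point_alt
  by_cases h3 : 2 < arr.length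
  · rw [if_pos h3, if_neg (by omega)]
    exact bool_eq_of_iff ((balance_A arr).trans (balance_B arr h3).symm)
  · rw [if_neg h3, if_pos (by omega)]
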